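-- pv_equiv track=rewrite | github.com/fenghaitao/potpie | .kiro/skills/repowiki/tests/test_markdown_generation.py | _has_consecutive_headings
-- ===== SOURCE A (Python) =====
-- def _has_consecutive_headings(markdown: str) -> bool:
--     lines = markdown.splitlines()
--     i = 0
--     while i < len(lines):
--         if lines[i].startswith("#"):
--             j = i + 1
--             while j < len(lines) and lines[j].strip() == "":
--                 j += 1
--             if j < len(lines) and lines[j].startswith("#"):
--                 return True
--         i += 1
--     return False
-- ===== SOURCE B (Python) =====
-- def _has_consecutive_headings(markdown: str) -> bool:
--     nonblank = [ln for ln in markdown.splitlines() if ln.strip() != ""]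
--     return any(a.startswith("#") and b.startswith("#")
--                for a, b in zip(nonblank, nonblank[1:]))
-- ===== Notes on version B (the rewrite author's own statement) =====
-- stated objective: simpler
-- what changed: Replaces the index-based outer while with a heading-triggered inner blank-skipping loop by a single filter of non-blank lines followed by one pairwise adjacent scan.
import Mathlib
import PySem

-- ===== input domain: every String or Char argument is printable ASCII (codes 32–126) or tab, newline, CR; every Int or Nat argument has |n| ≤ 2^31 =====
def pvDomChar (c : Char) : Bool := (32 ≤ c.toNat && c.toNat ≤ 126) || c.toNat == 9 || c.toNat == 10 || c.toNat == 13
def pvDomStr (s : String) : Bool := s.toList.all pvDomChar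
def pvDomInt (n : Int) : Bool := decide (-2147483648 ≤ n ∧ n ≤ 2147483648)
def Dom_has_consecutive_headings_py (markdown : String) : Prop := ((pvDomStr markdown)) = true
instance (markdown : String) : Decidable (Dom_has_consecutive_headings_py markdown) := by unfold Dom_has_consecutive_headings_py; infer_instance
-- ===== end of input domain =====

-- B replaces A's index-based scan with inner blank-skipping loop by filter-nonblank + adjacent pairwise scan (simpler decomposition, same cost).


-- ===== PORT A =====
-- inner 'while j < len(lines) and lines[j].strip() == "": j += 1' followed by the
-- 'j < len(lines)' test: first non-blank line of the suffix, if any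
def pvSkipBlanks : List String → Option String
  | [] => none
  | l :: ls => if PySem.Str.strip l = "" then pvSkipBlanks ls else some l

-- outer 'while i < len(lines): … i += 1' as structural recursion on the suffix
def pvALoop : List String → Bool
  | [] => false
  | l :: ls =>
    if PySem.Str.startswith l "#" then
      match pvSkipBlanks ls with
      | some nxt => if PySem.Str.startswith nxt "#" then true else pvALoop ls
      | none => pvALoop ls
    else pvALoop ls

def has_consecutive_headings_py (markdown : String) : Bool :=
  pvALoop (PySem.Str.splitlines markdown)

-- ===== PORT B =====
def has_consecutive_headings_py_alt (markdown : String) : Bool :=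
  let nonblank := (PySem.Str.splitlines markdown).filter (fun ln => PySem.Str.strip ln != "")
  (nonblank.zip nonblank.tail).any
    (fun p => PySem.Str.startswith p.1 "#" && PySem.Str.startswith p.2 "#")

-- ===== PRECONDITION & SPEC =====
def Spec_has_consecutive_headings_py (markdown : String) (out : Bool) : Prop := out = has_consecutive_headings_py_alt markdown
instance (markdown : String) (out : Bool) : Decidable (Spec_has_consecutive_headings_py markdown out) := by unfold Spec_has_consecutive_headings_py; infer_instance

-- ===== CLAIM (what is proved, stated in full; the proofs are below) =====
def Claim_equal_has_consecutive_headings_py : Prop := ∀ (markdown : String), Dom_has_consecutive_headings_py markdown → Spec_has_consecutive_headings_py markdown (has_consecutive_headings_py markdown)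

-- ===== LEMMAS AND PROOFS =====

-- a whitespace-only line cannot start with '#'
lemma pv_blank_not_heading (l : String) (h : PySem.Str.strip l = "") :
    PySem.Str.startswith l "#" = false := by
  have hc : PySem.Chars.strip l.toList = [] := by
    have := congrArg String.toList h
    simpa [PySem.Str.strip] using this
  have hall : ∀ c ∈ l.toList, PySem.Chars.isspace c = true := by
    have hl : ∀ c ∈ PySem.Chars.lstrip l.toList, PySem.Chars.isspace c = true := by
      intro c hc'
      have h2 : List.dropWhile PySem.Chars.isspace (PySem.Chars.lstrip l.toList).reverse = [] := by
        have h3 := hc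
        simp only [PySem.Chars.strip, PySem.Chars.rstrip, List.reverse_eq_nil_iff] at h3
        exact h3
      exact (List.dropWhile_eq_nil_iff.mp h2) c (List.mem_reverse.mpr hc')
    intro c hc'
    have : c ∈ List.takeWhile PySem.Chars.isspace l.toList ++ List.dropWhile PySem.Chars.isspace l.toList := by
      simpa [List.takeWhile_append_dropWhile]
    rcases List.mem_append.mp this with h1 | h2
    · exact List.mem_takeWhile_imp h1
    · exact hl c h2
  simp only [PySem.Str.startswith, PySem.Chars.startswith]
  cases hl : l.toList with
  | nil => simp
  | cons c t =>
    by_contra hne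
    have hp : ("#".toList).isPrefixOf (c :: t) = true := by
      simpa using Bool.of_not_eq_false hne
    have hcq : c = '#' := by
      have : '#' = c := by simpa [List.isPrefixOf] using hp
      exact this.symm
    have := hall c (hl ▸ List.mem_cons_self ..)
    rw [hcq] at this
    simp [PySem.Chars.isspace] at this

lemma pv_skip_eq_head (ls : List String) :
    pvSkipBlanks ls = (ls.filter (fun ln => PySem.Str.strip ln != "")).head? := by
  induction ls with
  | nil => rfl
  | cons l ls ih =>
    by_cases h : PySem.Str.strip l = ""
    · have hc : (PySem.Str.strip l != "") = false := by simp [h]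
      simp [pvSkipBlanks, h, ih]
    · have hc : (PySem.Str.strip l != "") = true := by simp [h]
      simp [pvSkipBlanks, h]

lemma pv_main (ls : List String) :
    pvALoop ls =
      (((ls.filter (fun ln => PySem.Str.strip ln != "")).zip
        (ls.filter (fun ln => PySem.Str.strip ln != "")).tail).any
        (fun p => PySem.Str.startswith p.1 "#" && PySem.Str.startswith p.2 "#")) := by
  induction ls with
  | nil => rfl
  | cons l ls ih =>
    by_cases h : PySem.Str.strip l = ""
    · -- blank line: dropped by the filter; it cannot start with '#'
      have hc : (PySem.Str.strip l != "") = false := by simp [h]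
      have hh := pv_blank_not_heading l h
      cases hsk : pvSkipBlanks ls <;>
        simp only [pvALoop, hsk, hh, Bool.false_eq_true, if_false, List.filter_cons, hc, ih]
    · -- non-blank line: kept by the filter
      have hc : (PySem.Str.strip l != "") = true := by simp [h]
      rw [List.filter_cons, if_pos hc]
      cases hnb : ls.filter (fun ln => PySem.Str.strip ln != "") with
      | nil =>
        have hs : pvSkipBlanks ls = none := by rw [pv_skip_eq_head, hnb]; rfl
        rw [hnb] at ih
        simp [pvALoop, hs, ih]
      | cons nx t =>
        have hs : pvSkipBlanks ls = some nx := by rw [pv_skip_eq_head, hnb]; rfl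
        rw [hnb] at ih
        cases hh : PySem.Str.startswith l "#" <;>
          cases hh2 : PySem.Str.startswith nx "#" <;>
            simp only [pvALoop, hs, hh, hh2, ih, List.tail_cons, List.zip_cons_cons,
              List.any_cons, if_true, if_false, Bool.false_eq_true, Bool.true_eq_false,
              Bool.true_and, Bool.false_and, Bool.true_or, Bool.false_or, Bool.or_self,
              ite_self, ite_true, ite_false]

-- ===== VERDICT (by name: the statement is the Claim_ definition above) =====
theorem has_consecutive_headings_py_spec : Claim_equal_has_consecutive_headings_py := by
  intro markdown _
  unfold Spec_has_consecutive_headings_py has_consecutive_headings_py has_consecutive_headings_py_alt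
  simpa using pv_main (PySem.Str.splitlines markdown)
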